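-- pv_equiv track=rewrite | github.com/dwycoff2013/dual-stream-redraft | dualstream/artifacts.py | summarize_frames
-- ===== SOURCE A (Python) =====
-- from typing import Any
--
-- def summarize_frames(frames: list[dict[str, Any]]) -> dict[str, Any]:
--     if not frames:
--         return {"num_frames": 0}
--     with_topk = sum(1 for fr in frames if fr.get("topk_tokens"))
--     with_concepts = sum(1 for fr in frames if fr.get("concepts"))
--     with_attention = sum(1 for fr in frames if fr.get("attn"))
--     return {
--         "num_frames": len(frames),
--         "with_topk": with_topk,
--         "with_concepts": with_concepts,
--         "with_attention": with_attention,
--     }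
-- ===== SOURCE B (Python) =====
-- from typing import Any
--
-- FLAG_KEYS = ("topk_tokens", "concepts", "attn")
--
-- def summarize_frames(frames: list[dict[str, Any]]) -> dict[str, Any]:
--     if not frames:
--         return {"num_frames": 0}
--     # flatten to a list of present-flag tags, then histogram it once
--     tags = [key for fr in frames for key in FLAG_KEYS if fr.get(key)]
--     tally: dict[str, int] = {}
--     for key in tags:
--         tally[key] = tally.get(key, 0) + 1
--     return {
--         "num_frames": len(frames),
--         "with_topk": tally.get("topk_tokens", 0),
--         "with_concepts": tally.get("concepts", 0),
--         "with_attention": tally.get("attn", 0),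
--     }
-- ===== Notes on version B (the rewrite author's own statement) =====
-- stated objective: alternative
-- what changed: Instead of three per-field counting scans, B flattens the frames into a single list of present-flag tags and builds one histogram dictionary (a Counter by hand), reading the three counts from it at the end.
import Mathlib
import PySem

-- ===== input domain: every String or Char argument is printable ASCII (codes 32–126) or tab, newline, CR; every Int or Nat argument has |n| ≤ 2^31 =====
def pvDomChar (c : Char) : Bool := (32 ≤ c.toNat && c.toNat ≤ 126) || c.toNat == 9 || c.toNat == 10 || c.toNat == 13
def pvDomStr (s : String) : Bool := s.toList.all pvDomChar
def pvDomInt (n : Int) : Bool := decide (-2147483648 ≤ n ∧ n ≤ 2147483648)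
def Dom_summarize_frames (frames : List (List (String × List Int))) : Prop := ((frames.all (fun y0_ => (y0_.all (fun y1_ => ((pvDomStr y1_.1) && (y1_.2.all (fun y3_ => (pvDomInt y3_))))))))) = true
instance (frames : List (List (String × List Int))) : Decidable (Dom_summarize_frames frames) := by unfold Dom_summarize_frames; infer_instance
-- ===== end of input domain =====

-- B replaces A's three per-field counting scans by flattening the frames into one list of present-flag tags and building a single histogram dictionary, then reading the three counts from it (objective: alternative).


-- ===== PORT A =====
-- fr.get(k) truthiness: key present with a nonempty list value
def pvTruthy (fr : List (String × List Int)) (k : String) : Bool :=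
  !((PySem.Dict.mk fr).getD k []).isEmpty

def summarize_frames (frames : List (List (String × List Int))) : List (String × Int) :=
  if frames.isEmpty then [("num_frames", 0)]
  else
    let with_topk : Int := frames.foldl (fun acc fr => if pvTruthy fr "topk_tokens" then acc + 1 else acc) 0
    let with_concepts : Int := frames.foldl (fun acc fr => if pvTruthy fr "concepts" then acc + 1 else acc) 0
    let with_attention : Int := frames.foldl (fun acc fr => if pvTruthy fr "attn" then acc + 1 else acc) 0
    [("num_frames", (frames.length : Int)),
     ("with_topk", with_topk),
     ("with_concepts", with_concepts),
     ("with_attention", with_attention)]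

-- ===== PORT B =====
def pvFlagKeys : List String := ["topk_tokens", "concepts", "attn"]

def summarize_frames_alt (frames : List (List (String × List Int))) : List (String × Int) :=
  if frames.isEmpty then [("num_frames", 0)]
  else
    let tags := frames.flatMap (fun fr => pvFlagKeys.filter (fun k => pvTruthy fr k))
    let tally := tags.foldl (fun d k => d.modify k 0 (· + 1)) (PySem.Dict.empty : PySem.Dict String Int)
    [("num_frames", (frames.length : Int)),
     ("with_topk", tally.getD "topk_tokens" 0),
     ("with_concepts", tally.getD "concepts" 0),
     ("with_attention", tally.getD "attn" 0)]

-- ===== PRECONDITION & SPEC =====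
def Spec_summarize_frames (frames : List (List (String × List Int))) (out : List (String × Int)) : Prop := out = summarize_frames_alt frames
instance (frames : List (List (String × List Int))) (out : List (String × Int)) : Decidable (Spec_summarize_frames frames out) := by unfold Spec_summarize_frames; infer_instance

-- ===== CLAIM =====
def Claim_equal_summarize_frames : Prop := ∀ (frames : List (List (String × List Int))), Dom_summarize_frames frames → Spec_summarize_frames frames (summarize_frames frames)

-- ===== LEMMAS AND PROOFS =====
-- A's counting fold is acc + countP
theorem pv_foldA (p : List (String × List Int) → Bool) (l : List (List (String × List Int))) (acc : Int) :
    l.foldl (fun acc fr => if p fr then acc + 1 else acc) acc = acc + (l.countP p : Int) := by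
  induction l generalizing acc with
  | nil => simp
  | cons fr rest ih =>
      simp only [List.foldl_cons, List.countP_cons, ih]
      split_ifs with h <;> simp <;> ring

-- per frame, the flag key occurs in the filtered tag list exactly when its field is truthy
theorem pv_frame_count (fr : List (String × List Int)) (k : String) (hk : k ∈ pvFlagKeys) :
    (pvFlagKeys.filter (fun k' => pvTruthy fr k')).count k = (if pvTruthy fr k then 1 else 0) := by
  fin_cases hk <;>
    (cases h1 : pvTruthy fr "topk_tokens" <;> cases h2 : pvTruthy fr "concepts" <;>
      cases h3 : pvTruthy fr "attn" <;> simp [pvFlagKeys, List.filter, h1, h2, h3])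

-- count of a fixed flag key in the flattened tag list is countP of its truthiness
theorem pv_count_tags (k : String) (hk : k ∈ pvFlagKeys) (l : List (List (String × List Int))) :
    (l.flatMap (fun fr => pvFlagKeys.filter (fun k => pvTruthy fr k))).count k
      = l.countP (fun fr => pvTruthy fr k) := by
  induction l with
  | nil => simp
  | cons fr rest ih =>
      simp only [List.flatMap_cons, List.count_append, List.countP_cons, ih, pv_frame_count fr k hk]
      cases h : pvTruthy fr k <;> simp <;> omega

-- ===== VERDICT =====
theorem summarize_frames_spec : Claim_equal_summarize_frames := by
  intro frames _
  unfold Spec_summarize_frames summarize_frames summarize_frames_alt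
  by_cases h : frames.isEmpty
  · simp [h]
  · simp only [h, if_neg, Bool.false_eq_true, not_false_eq_true]
    have hget := fun (k : String) =>
      PySem.Dict.getD_foldl_modify_add_one
        (l := frames.flatMap (fun fr => pvFlagKeys.filter (fun k => pvTruthy fr k)))
        (d := (PySem.Dict.empty : PySem.Dict String Int)) (v := k)
    simp only [PySem.Dict.getD_empty] at hget
    rw [hget, hget, hget,
        pv_count_tags "topk_tokens" (by decide),
        pv_count_tags "concepts" (by decide),
        pv_count_tags "attn" (by decide),
        pv_foldA, pv_foldA, pv_foldA]
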